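-- pv_equiv track=rewrite | github.com/danilohsales/Quest-es-python | QUESTÕES PY/34.py | tem_afinidade
-- ===== SOURCE A (Python) =====
-- def tem_afinidade(l1, l2):
--     artista_comun = 0
--
--     for artista1 in l1:
--         for artista2 in l2:
--             if artista1 == artista2:
--                 artista_comun += 1
--
--                 if artista_comun >= 3:
--                     return True
--     return False
-- ===== SOURCE B (Python) =====
-- def tem_afinidade(l1, l2):
--     counts = {}
--     for artista in l2:
--         counts[artista] = counts.get(artista, 0) + 1
--     total = 0
--     for artista in l1:
--         total += counts.get(artista, 0)
--         if total >= 3: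
--             return True
--     return False
-- ===== Notes on version B (the rewrite author's own statement) =====
-- stated objective: alternative
-- what changed: Replaces the nested rescan of l2 for every element of l1 by a count dictionary built once over l2, then a single pass over l1 accumulating the pair total with the same >=3 short-circuit; A's early exit makes it fast on matching inputs, so the measured cost is similar.
import Mathlib
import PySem

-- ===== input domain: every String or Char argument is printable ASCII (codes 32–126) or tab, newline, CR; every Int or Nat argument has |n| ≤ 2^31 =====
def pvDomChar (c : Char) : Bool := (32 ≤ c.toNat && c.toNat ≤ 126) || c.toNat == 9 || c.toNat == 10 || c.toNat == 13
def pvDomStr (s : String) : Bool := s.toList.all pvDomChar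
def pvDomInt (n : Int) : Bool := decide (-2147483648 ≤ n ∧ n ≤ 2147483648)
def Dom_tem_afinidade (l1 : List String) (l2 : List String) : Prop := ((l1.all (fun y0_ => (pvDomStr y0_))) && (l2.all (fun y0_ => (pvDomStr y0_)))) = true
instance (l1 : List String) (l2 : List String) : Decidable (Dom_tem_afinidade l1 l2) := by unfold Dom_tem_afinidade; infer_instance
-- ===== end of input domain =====

-- B builds a count dictionary over l2 once, then one pass over l1 accumulates the pair total
-- with the same >=3 short-circuit (objective: alternative single-pass decomposition).


-- ===== PORT A =====
-- inner 'for artista2 in l2' loop: none = the 'return True' fired, some c = loop finished with counter c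
def temAfInner (artista1 : String) : List String → Int → Option Int
  | [], c => some c
  | artista2 :: rest, c =>
    if artista1 == artista2 then
      if c + 1 ≥ 3 then none else temAfInner artista1 rest (c + 1)
    else temAfInner artista1 rest c

-- outer 'for artista1 in l1' loop
def temAfOuter (l2 : List String) : List String → Int → Bool
  | [], _ => false
  | artista1 :: rest, c =>
    match temAfInner artista1 l2 c with
    | none => true
    | some c' => temAfOuter l2 rest c'

def tem_afinidade (l1 : List String) (l2 : List String) : Bool :=
  temAfOuter l2 l1 0

-- ===== PORT B =====
-- 'for artista in l2: counts[artista] = counts.get(artista, 0) + 1'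
def temAfCounts (l2 : List String) : PySem.Dict String Int :=
  l2.foldl (fun d a => d.insert a (d.getD a 0 + 1)) PySem.Dict.empty

-- 'for artista in l1: total += counts.get(artista, 0); if total >= 3: return True'
def temAfLoopB (counts : PySem.Dict String Int) : List String → Int → Bool
  | [], _ => false
  | artista :: rest, total =>
    let total' := total + counts.getD artista 0
    if total' ≥ 3 then true else temAfLoopB counts rest total'

def tem_afinidade_alt (l1 : List String) (l2 : List String) : Bool :=
  temAfLoopB (temAfCounts l2) l1 0

-- ===== PRECONDITION & SPEC =====
def Spec_tem_afinidade (l1 : List String) (l2 : List String) (out : Bool) : Prop := out = tem_afinidade_alt l1 l2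
instance (l1 : List String) (l2 : List String) (out : Bool) : Decidable (Spec_tem_afinidade l1 l2 out) := by unfold Spec_tem_afinidade; infer_instance

-- ===== CLAIM (what is proved, stated in full; the proofs are below) =====
def Claim_equal_tem_afinidade : Prop := ∀ (l1 : List String) (l2 : List String), Dom_tem_afinidade l1 l2 → Spec_tem_afinidade l1 l2 (tem_afinidade l1 l2)

-- ===== LEMMAS AND PROOFS =====

-- total pair count Σ_{a ∈ l1} count_{l2}(a), the common yardstick of both loops
def temAfTotal (l2 : List String) (l1 : List String) : Int :=
  (l1.map (fun a => (l2.count a : Int))).sum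

theorem temAfTotal_nonneg (l2 l1 : List String) : 0 ≤ temAfTotal l2 l1 := by
  induction l1 with
  | nil => simp [temAfTotal]
  | cons a rest ih =>
    simp only [temAfTotal, List.map_cons, List.sum_cons] at *
    positivity

theorem temAfInner_eq (a : String) (l2 : List String) (c : Int) (hc : c < 3) :
    temAfInner a l2 c =
      if c + (l2.count a : Int) ≥ 3 then none else some (c + (l2.count a : Int)) := by
  induction l2 generalizing c with
  | nil => simp [temAfInner]; omega
  | cons b rest ih =>
    by_cases hb : a == b
    · have hba : b = a := (beq_iff_eq.mp hb).symm
      simp only [temAfInner, if_pos, List.count_cons, hba, beq_self_eq_true]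
      by_cases h3 : c + 1 ≥ 3
      · have : c + 1 = 3 := by omega
        simp [h3]
        have := Int.natCast_nonneg (rest.count a)
        omega
      · rw [if_neg h3, ih (c + 1) (by omega)]
        push_cast
        ring_nf
    · have hba : ¬ b = a := fun h => hb (by simp [h])
      simp [temAfInner, hb, hba, ih c hc]

theorem temAfOuter_eq (l2 l1 : List String) (c : Int) (hc : c < 3) :
    temAfOuter l2 l1 c = decide (c + temAfTotal l2 l1 ≥ 3) := by
  induction l1 generalizing c with
  | nil => simp [temAfOuter, temAfTotal]; omega
  | cons a rest ih =>
    have hrest := temAfTotal_nonneg l2 rest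
    rw [temAfOuter, temAfInner_eq a l2 c hc]
    by_cases h3 : c + (l2.count a : Int) ≥ 3
    · simp only [if_pos h3]
      have : c + temAfTotal l2 (a :: rest) ≥ 3 := by
        simp only [temAfTotal, List.map_cons, List.sum_cons] at *
        omega
      simp [this]
    · simp only [if_neg h3]
      rw [ih (c + (l2.count a : Int)) (by omega)]
      simp only [temAfTotal, List.map_cons, List.sum_cons, add_assoc]
      rfl

theorem temAfCounts_getD (l2 : List String) (a : String) :
    (temAfCounts l2).getD a 0 = (l2.count a : Int) := by
  suffices h : ∀ (l : List String) (d : PySem.Dict String Int),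
      (l.foldl (fun d x => d.insert x (d.getD x 0 + 1)) d).getD a 0 = d.getD a 0 + (l.count a : Int) by
    have := h l2 PySem.Dict.empty
    simpa [temAfCounts, PySem.Dict.getD_empty] using this
  intro l
  induction l with
  | nil => intro d; simp
  | cons b rest ih =>
    intro d
    simp only [List.foldl_cons, ih, PySem.Dict.getD_insert, List.count_cons]
    by_cases hab : a = b
    · simp [hab]; ring
    · have : ¬ (b == a) := fun h => hab (beq_iff_eq.mp h).symm
      simp [hab, this]

theorem temAfLoopB_eq (l2 l1 : List String) (t : Int) (ht : t < 3) :
    temAfLoopB (temAfCounts l2) l1 t = decide (t + temAfTotal l2 l1 ≥ 3) := by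
  induction l1 generalizing t with
  | nil => simp [temAfLoopB, temAfTotal]; omega
  | cons a rest ih =>
    have hrest := temAfTotal_nonneg l2 rest
    simp only [temAfLoopB, temAfCounts_getD]
    by_cases h3 : t + (l2.count a : Int) ≥ 3
    · have : t + temAfTotal l2 (a :: rest) ≥ 3 := by
        simp only [temAfTotal, List.map_cons, List.sum_cons] at *
        omega
      simp [h3, this]
    · simp only [if_neg h3]
      rw [ih (t + (l2.count a : Int)) (by omega)]
      simp only [temAfTotal, List.map_cons, List.sum_cons, add_assoc]
      rfl

-- ===== VERDICT (by name: the statement is the Claim_ definition above) =====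
theorem tem_afinidade_spec : Claim_equal_tem_afinidade := by
  intro l1 l2 _
  unfold Spec_tem_afinidade tem_afinidade tem_afinidade_alt
  rw [temAfOuter_eq l2 l1 0 (by norm_num), temAfLoopB_eq l2 l1 0 (by norm_num)]
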